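-- pv_equiv track=rewrite | github.com/AnaMaria2019/recommendation-system-and-web-scraping | utils/helper_functions.py | convert_string_to_int
-- ===== SOURCE A (Python) =====
-- def convert_string_to_int(s):
--     n = 0
--     for c in s:
--         if c.isdigit():
--             n = n * 10 + int(c)
--         elif c == ',':
--             break
--
--     return n
-- ===== SOURCE B (Python) =====
-- def convert_string_to_int(s):
--     i = s.find(',')
--     before = s if i == -1 else s[:i]
--     digits = ''.join(c for c in before if c.isdigit())
--     return int(digits) if digits else 0
-- ===== Notes on version B (the rewrite author's own statement) =====
-- stated objective: simpler
-- what changed: B isolates the segment before the first comma with str.find/slicing, joins its digit characters into one string, and delegates the accumulation to int() (0 when there are no digits), instead of A's incremental Horner loop with an inline comma break.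
import Mathlib
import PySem

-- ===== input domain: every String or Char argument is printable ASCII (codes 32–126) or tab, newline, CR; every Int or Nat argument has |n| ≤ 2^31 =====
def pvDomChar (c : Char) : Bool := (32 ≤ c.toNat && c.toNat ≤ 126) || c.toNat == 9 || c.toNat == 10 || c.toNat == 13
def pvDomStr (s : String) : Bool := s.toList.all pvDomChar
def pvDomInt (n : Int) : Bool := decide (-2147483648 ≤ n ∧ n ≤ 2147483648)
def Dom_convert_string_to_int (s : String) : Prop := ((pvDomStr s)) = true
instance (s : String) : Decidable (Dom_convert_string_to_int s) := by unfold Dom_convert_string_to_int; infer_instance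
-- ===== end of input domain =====

-- B replaces A's single Horner loop with an inline comma break by: find the first comma,
-- slice the string before it, join its digit characters, and delegate the accumulation to
-- int() (0 when there are no digits) — objective: a simpler, more declarative decomposition.

-- ===== PORT A =====
-- Python's `int(c)` is guarded by `c.isdigit()`, so it always succeeds; `.getD 0` is never hit.
def pvGoA : List Char → Int → Int
  | [], n => n
  | c :: cs, n =>
    if PySem.Chars.isdigit c then pvGoA cs (n * 10 + (PySem.Int.ofChars? [c]).getD 0)
    else if c = ',' then n
    else pvGoA cs n

def convert_string_to_int (s : String) : Int := pvGoA s.toList 0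

-- ===== PORT B =====
-- Hand port of Python's `int(digits)`: exact here because in B `digits` is always a nonempty
-- string consisting only of the ASCII digits '0'-'9', and on such strings int() is exactly
-- this left-to-right decimal accumulation (no sign/whitespace/underscore cases can arise).
def pvIntOfDigitChars (ds : List Char) : Int :=
  ds.foldl (fun a c => a * 10 + ((c.toNat : Int) - 48)) 0

def convert_string_to_int_alt (s : String) : Int :=
  let cs := s.toList
  let i := PySem.Chars.find cs [',']
  let before := if i = -1 then cs else PySem.List.slice cs none (some i)
  let digits := before.filter PySem.Chars.isdigit
  if digits = [] then 0 else pvIntOfDigitChars digits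

-- ===== PRECONDITION & SPEC =====
def Spec_convert_string_to_int (s : String) (out : Int) : Prop := out = convert_string_to_int_alt s
instance (s : String) (out : Int) : Decidable (Spec_convert_string_to_int s out) := by unfold Spec_convert_string_to_int; infer_instance

-- ===== CLAIM (what is proved, stated in full; the proofs are below) =====
def Claim_equal_convert_string_to_int : Prop := ∀ (s : String), Dom_convert_string_to_int s → Spec_convert_string_to_int s (convert_string_to_int s)

-- ===== LEMMAS AND PROOFS =====

lemma pv_isdigit_bounds (c : Char) (h : PySem.Chars.isdigit c = true) :
    48 ≤ c.toNat ∧ c.toNat ≤ 57 := by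
  simp only [PySem.Chars.isdigit, Bool.and_eq_true, decide_eq_true_eq] at h
  obtain ⟨h1, h2⟩ := h
  rw [Char.le_def] at h1 h2
  exact ⟨h1, h2⟩

lemma pv_digit_cases (c : Char) (h : PySem.Chars.isdigit c = true) :
    c = '0' ∨ c = '1' ∨ c = '2' ∨ c = '3' ∨ c = '4' ∨ c = '5' ∨ c = '6' ∨ c = '7' ∨ c = '8' ∨ c = '9' := by
  obtain ⟨h1, h2⟩ := pv_isdigit_bounds c h
  have hk : c.toNat = 48 ∨ c.toNat = 49 ∨ c.toNat = 50 ∨ c.toNat = 51 ∨ c.toNat = 52 ∨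
      c.toNat = 53 ∨ c.toNat = 54 ∨ c.toNat = 55 ∨ c.toNat = 56 ∨ c.toNat = 57 := by omega
  have hofn := Char.ofNat_toNat c
  rcases hk with h | h | h | h | h | h | h | h | h | h <;> rw [h] at hofn <;>
    rw [← hofn] <;> decide

lemma pv_digit_val (c : Char) (h : PySem.Chars.isdigit c = true) :
    (PySem.Int.ofChars? [c]).getD 0 = (c.toNat : Int) - 48 := by
  rcases pv_digit_cases c h with h | h | h | h | h | h | h | h | h | h <;> subst h <;> decide

lemma pv_digit_ne_comma (c : Char) (h : PySem.Chars.isdigit c = true) : ¬ (c = ',') := by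
  rcases pv_digit_cases c h with h | h | h | h | h | h | h | h | h | h <;> subst h <;> decide

-- A's loop computes the decimal accumulation over the digits before the first comma
lemma pvGoA_eq (cs : List Char) (n : Int) :
    pvGoA cs n = ((cs.takeWhile (fun c => !(c == ','))).filter PySem.Chars.isdigit).foldl
      (fun a c => a * 10 + ((c.toNat : Int) - 48)) n := by
  induction cs generalizing n with
  | nil => simp [pvGoA]
  | cons c t ih =>
    by_cases hd : PySem.Chars.isdigit c = true
    · have hne : ¬ (c = ',') := pv_digit_ne_comma c hd
      simp [pvGoA, hd, hne, pv_digit_val c hd, ih]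
    · by_cases hcm : c = ','
      · subst hcm
        simp [pvGoA, hd]
      · simp [pvGoA, hd, hcm, ih]

-- take up to the first failure of p is takeWhile p
lemma pv_take_eq_takeWhile {α : Type} (p : α → Bool) :
    ∀ (cs : List α) (k : Nat),
      (∀ j, j < k → (hl : j < cs.length) → p (cs[j]'hl) = true) →
      (∀ hl : k < cs.length, p (cs[k]'hl) = false) →
      cs.take k = cs.takeWhile p
  | [], k, _, _ => by simp
  | c :: t, 0, _, h2 => by
    have := h2 (by simp)
    simp at this
    simp [this]
  | c :: t, k + 1, h1, h2 => by
    have hc : p c = true := h1 0 (by omega) (by simp)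
    simp only [List.take_succ_cons, List.takeWhile_cons, hc, if_true]
    refine congrArg (c :: ·) (pv_take_eq_takeWhile p t k ?_ ?_)
    · intro j hj hl
      have := h1 (j + 1) (by omega) (by simpa using Nat.succ_lt_succ hl)
      simpa using this
    · intro hl
      have := h2 (by simpa using Nat.succ_lt_succ hl)
      simpa using this

-- [a] <+: l ↔ l[0] = a, applied after drop
lemma pv_singleton_prefix_drop (l : List Char) (a : Char) (j : Nat) :
    [a] <+: l.drop j ↔ l[j]? = some a := by
  rw [← List.head?_drop]
  constructor
  · rintro ⟨ys, hys⟩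
    rw [← hys]
    simp
  · intro h
    rcases List.head?_eq_some_iff.mp h with ⟨ys, hys⟩
    exact ⟨ys, by simp [hys]⟩

-- the part of s before the first comma is takeWhile (≠ ',')
lemma pv_before_eq (cs : List Char) :
    (if PySem.Chars.find cs [','] = -1 then cs
     else PySem.List.slice cs none (some (PySem.Chars.find cs [',']))) =
      cs.takeWhile (fun c => !(c == ',')) := by
  by_cases h : PySem.Chars.find cs [','] = -1
  · rw [if_pos h]
    have hni : ¬ ([','] <:+: cs) := (PySem.Chars.find_eq_neg_one_iff cs [',']).mp h
    have hmem : ',' ∉ cs := by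
      intro hm
      obtain ⟨p, q, hpq⟩ := List.append_of_mem hm
      exact hni ⟨p, q, by rw [hpq]; simp⟩
    symm
    apply List.takeWhile_eq_self_iff.mpr
    intro x hx
    simp only [Bool.not_eq_true', beq_eq_false_iff_ne, ne_eq]
    exact fun he => hmem (he ▸ hx)
  · rw [if_neg h]
    have h0 : 0 ≤ PySem.Chars.find cs [','] := by
      have := PySem.Chars.neg_one_le_find (s := cs) (sub := [','])
      omega
    obtain ⟨hpre, hmin⟩ := PySem.Chars.find_spec h0
    rw [PySem.List.slice_to cs h0]
    apply pv_take_eq_takeWhile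
    · intro j hj hl
      have hnp := hmin j hj
      rw [pv_singleton_prefix_drop] at hnp
      simp only [List.getElem?_eq_getElem hl] at hnp
      simpa using hnp
    · intro hl
      have := (pv_singleton_prefix_drop cs ',' _).mp hpre
      simp only [List.getElem?_eq_getElem hl] at this
      simp [Option.some_inj.mp this]

-- ===== VERDICT (by name: the statement is the Claim_ definition above) =====
theorem convert_string_to_int_spec : Claim_equal_convert_string_to_int := by
  intro s _
  unfold Spec_convert_string_to_int convert_string_to_int convert_string_to_int_alt
  rw [pvGoA_eq]
  simp only [pv_before_eq]
  by_cases hd : (s.toList.takeWhile (fun c => !(c == ','))).filter PySem.Chars.isdigit = []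
  · simp [hd]
  · simp [hd, pvIntOfDigitChars]
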